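-- pv_equiv track=rewrite | github.com/groscot/pygraving | pygraving/layouts/commons.py | generate_alterations_degrees
-- ===== SOURCE A (Python) =====
-- def generate_alterations_degrees(type: str, number: int) -> list[int]:
--     if type == "flat":
--         min_d = 3
--         d = 6
--         skip = 3
--     if type == "sharp":
--         min_d = 7
--         d = 10
--         skip = 4
--
--     degrees = []
--     for i in range(number):
--         degrees.append(d)
--         d = (d-min_d + skip)%7 + min_d
--     return degrees
-- ===== SOURCE B (Python) =====
-- CYCLES = {"flat": [6, 9, 5, 8, 4, 7, 3], "sharp": [10, 7, 11, 8, 12, 9, 13]}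
--
--
-- def generate_alterations_degrees(type: str, number: int) -> list[int]:
--     # The degree sequence is periodic with period 7: tile the precomputed
--     # 7-element cycle for the accidental type and truncate to `number`.
--     cycle = CYCLES.get(type, [])
--     reps = (number + 6) // 7
--     return (cycle * reps)[:number]
-- ===== Notes on version B (the rewrite author's own statement) =====
-- stated objective: alternative
-- what changed: replaced the per-element recurrence that threads the running degree d through the loop by a precomputed 7-element cycle table per accidental type, tiled with list repetition and truncated by a slice (the sequence is 7-periodic)
import Mathlib
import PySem

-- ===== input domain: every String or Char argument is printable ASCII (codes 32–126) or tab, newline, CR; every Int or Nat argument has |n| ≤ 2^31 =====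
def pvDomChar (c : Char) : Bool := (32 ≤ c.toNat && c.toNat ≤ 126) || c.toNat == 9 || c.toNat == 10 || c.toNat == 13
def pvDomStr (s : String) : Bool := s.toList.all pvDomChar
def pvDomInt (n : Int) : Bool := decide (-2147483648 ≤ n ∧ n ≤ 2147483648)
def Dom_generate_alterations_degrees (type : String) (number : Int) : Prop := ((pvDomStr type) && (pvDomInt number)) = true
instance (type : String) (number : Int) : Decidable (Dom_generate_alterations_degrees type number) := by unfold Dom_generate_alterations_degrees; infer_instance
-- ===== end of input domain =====

-- B replaces A's stateful recurrence with a precomputed 7-element cycle per type, tiled and truncated (alternative, same cost).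


-- ===== PORT A =====
-- Literal port of A: set (min_d, d, skip) by the two if-branches, then the stateful loop
-- that appends d and updates it by the recurrence. The final (0,0,0) fallback is unreachable
-- under Pre_ (Python raises UnboundLocalError there when number > 0; with number ≤ 0 the loop is empty).
def generate_alterations_degrees (type : String) (number : Int) : List Int :=
  let p : Int × Int × Int :=
    if type == "flat" then (3, 6, 3)
    else if type == "sharp" then (7, 10, 4)
    else (0, 0, 0)
  let min_d := p.1; let d0 := p.2.1; let skip := p.2.2
  ((PySem.List.pyRange 0 number 1).foldl
    (fun (st : Int × List Int) _ =>
      (PySem.Int.mod (st.1 - min_d + skip) 7 + min_d, st.2 ++ [st.1]))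
    (d0, [])).2

-- ===== PORT B =====
-- Literal port of B: the CYCLES table (a dict literal; .get ported as its first-match
-- lookup over the two literal keys), tile by list repetition, truncate with the slice [:number].
def pvCyclesGet (type : String) : List Int :=
  if type == "flat" then [6, 9, 5, 8, 4, 7, 3]
  else if type == "sharp" then [10, 7, 11, 8, 12, 9, 13]
  else []

def generate_alterations_degrees_alt (type : String) (number : Int) : List Int :=
  let cycle := pvCyclesGet type
  let reps := PySem.Int.floordiv (number + 6) 7
  PySem.List.slice (PySem.List.pyRepeat cycle reps) none (some number)

-- ===== PRECONDITION & SPEC =====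
-- Pre_ excludes only inputs where the Python A raises UnboundLocalError (type neither "flat" nor
-- "sharp" while number > 0: min_d/d/skip are unbound when the loop body runs).
def Pre_generate_alterations_degrees (type : String) (number : Int) : Prop :=
  type = "flat" ∨ type = "sharp" ∨ number ≤ 0
instance (type : String) (number : Int) : Decidable (Pre_generate_alterations_degrees type number) := by unfold Pre_generate_alterations_degrees; infer_instance
def pvWitness_generate_alterations_degrees : String × Int := ("flat", 3)


def Spec_generate_alterations_degrees (type : String) (number : Int) (out : List Int) : Prop := out = generate_alterations_degrees_alt type number
instance (type : String) (number : Int) (out : List Int) : Decidable (Spec_generate_alterations_degrees type number out) := by unfold Spec_generate_alterations_degrees; infer_instance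

-- ===== CLAIM (what is proved, stated in full; the proofs are below) =====
def Claim_equal_generate_alterations_degrees : Prop := ∀ (type : String) (number : Int), Dom_generate_alterations_degrees type number → Pre_generate_alterations_degrees type number → Spec_generate_alterations_degrees type number (generate_alterations_degrees type number)

-- ===== LEMMAS AND PROOFS =====

-- Loop invariant for A: starting from d = (c % 7) + m, after iterating over range n the
-- accumulated list is exactly the closed forms ((c + s*i) % 7) + m for i < n.
theorem pv_loop_inv (m s c : Int) (n : Nat) (acc : List Int) :
    (((List.range n).map (fun (k : Nat) => (k : Int))).foldl
      (fun (st : Int × List Int) _ =>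
        (PySem.Int.mod (st.1 - m + s) 7 + m, st.2 ++ [st.1]))
      (PySem.Int.mod c 7 + m, acc))
    = (PySem.Int.mod (c + s * n) 7 + m,
       acc ++ (List.range n).map (fun (k : Nat) => PySem.Int.mod (c + s * (k : Int)) 7 + m)) := by
  induction n generalizing acc with
  | zero => simp
  | succ n ih =>
      simp only [List.range_succ, List.map_append, List.foldl_append,
        List.map_cons, List.map_nil, List.foldl_cons, List.foldl_nil]
      rw [ih]
      refine Prod.ext_iff.mpr ⟨?_, ?_⟩
      · show PySem.Int.mod (PySem.Int.mod (c + s * (n : Int)) 7 + m - m + s) 7 + m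
            = PySem.Int.mod (c + s * ((n + 1 : Nat) : Int)) 7 + m
        rw [PySem.Int.mod_eq_emod_of_pos (show (0:Int) < 7 by norm_num),
            PySem.Int.mod_eq_emod_of_pos (show (0:Int) < 7 by norm_num),
            PySem.Int.mod_eq_emod_of_pos (show (0:Int) < 7 by norm_num)]
        rw [show (c + s * (n : Int)) % 7 + m - m + s = (c + s * (n : Int)) % 7 + s by ring,
            Int.emod_add_emod]
        congr 2
        push_cast; ring
      · simp

-- A's whole loop for one fixed parameter triple, any n.
theorem pv_case (m s c : Int) (n : Nat) :
    (((List.range n).map (fun (k : Nat) => (k : Int))).foldl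
      (fun (st : Int × List Int) _ =>
        (PySem.Int.mod (st.1 - m + s) 7 + m, st.2 ++ [st.1]))
      (PySem.Int.mod c 7 + m, [])).2
    = ((List.range n).map (fun (k : Nat) => (k : Int))).map
        (fun i => PySem.Int.mod (c + s * i) 7 + m) := by
  rw [pv_loop_inv]
  simp

-- Tiling a 7-element cycle r times is the closed form indexed mod 7.
theorem pv_tile (c : List Int) (hc : (List.range 7).map (fun j => c.getD j 0) = c) (r : Nat) :
    (List.replicate r c).flatten = (List.range (7 * r)).map (fun k => c.getD (k % 7) 0) := by
  induction r with
  | zero => simp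
  | succ r ih =>
      rw [List.replicate_succ', List.flatten_append, ih,
        show 7 * (r + 1) = 7 * r + 7 by ring, List.range_add, List.map_append]
      congr 1
      rw [List.map_map]
      have h : ∀ j ∈ List.range 7,
          ((fun k => c.getD (k % 7) 0) ∘ (fun x => 7 * r + x)) j = c.getD j 0 := by
        intro j hj
        simp only [List.mem_range] at hj
        simp only [Function.comp]
        congr 1
        omega
      rw [List.map_congr_left h, hc]
      simp

-- Each cycle element is the closed-form value of A's recurrence.
theorem pv_elem (c : List Int) (m s c0 : Int)
    (hc : ∀ t : Nat, t < 7 → c.getD t 0 = (c0 + s * t) % 7 + m) (k : Nat) :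
    c.getD (k % 7) 0 = PySem.Int.mod (c0 + s * (k : Int)) 7 + m := by
  rw [PySem.Int.mod_eq_emod_of_pos (show (0:Int) < 7 by norm_num),
      hc _ (Nat.mod_lt _ (by norm_num))]
  congr 1
  have hk : (k : Int) = ((k % 7 : Nat) : Int) + 7 * ((k / 7 : Nat) : Int) := by
    push_cast
    omega
  rw [hk, show c0 + s * (((k % 7 : Nat) : Int) + 7 * ((k / 7 : Nat) : Int))
        = (c0 + s * ((k % 7 : Nat) : Int)) + 7 * (s * ((k / 7 : Nat) : Int)) by ring,
      Int.add_mul_emod_self_left]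

-- B's value on a nonnegative count, reduced to the closed form.
theorem pv_alt_closed (cy : List Int) (m s c0 : Int)
    (hc7 : (List.range 7).map (fun j => cy.getD j 0) = cy)
    (hcv : ∀ t : Nat, t < 7 → cy.getD t 0 = (c0 + s * t) % 7 + m) (n : Nat) :
    PySem.List.slice (PySem.List.pyRepeat cy (PySem.Int.floordiv ((n : Int) + 6) 7)) none (some (n : Int))
    = (List.range n).map (fun (k : Nat) => PySem.Int.mod (c0 + s * (k : Int)) 7 + m) := by
  have hcast : ((n : Int) + 6) = ((n + 6 : Nat) : Int) := by push_cast; ring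
  rw [PySem.List.slice_to _ (Int.natCast_nonneg n)]
  unfold PySem.List.pyRepeat
  rw [hcast, show (7 : Int) = ((7 : Nat) : Int) from rfl, PySem.Int.floordiv_natCast]
  rw [Int.toNat_natCast, Int.toNat_natCast]
  rw [pv_tile cy hc7]
  rw [← List.map_take, List.take_range, Nat.min_eq_left (by omega)]
  exact List.map_congr_left fun k _ => pv_elem cy m s c0 hcv k

-- ===== VERDICT (by name: the statements are the Claim_ definitions above) =====
theorem generate_alterations_degrees_spec : Claim_equal_generate_alterations_degrees := by
  intro type number _ hpre
  unfold Spec_generate_alterations_degrees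
  by_cases hn : number ≤ 0
  · have hr : PySem.List.pyRange 0 number 1 = [] := by
      unfold PySem.List.pyRange
      split <;> simp_all
    have hreps : (PySem.Int.floordiv (number + 6) 7).toNat = 0 := by
      have h7 : (0:Int) < 7 := by norm_num
      have := (PySem.Int.floordiv_lt_iff_lt_mul (a := number + 6) (b := 7) (q := 1) h7).mpr (by omega)
      omega
    have hrep : PySem.List.pyRepeat (pvCyclesGet type) (PySem.Int.floordiv (number + 6) 7) = [] := by
      unfold PySem.List.pyRepeat
      rw [hreps]
      simp
    simp only [generate_alterations_degrees, generate_alterations_degrees_alt]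
    rw [hr, hrep]
    simp [PySem.List.slice, PySem.List.clampIdx]
  · obtain ⟨n, rfl⟩ : ∃ n : Nat, number = (n : Int) := ⟨number.toNat, by omega⟩
    unfold generate_alterations_degrees generate_alterations_degrees_alt pvCyclesGet
    rcases hpre with h | h | h
    · subst h
      simp only [beq_self_eq_true, if_pos]
      rw [show PySem.List.pyRange 0 ((n : Int)) 1 = PySem.List.pyRange 0 ((n : Int)) from rfl,
          PySem.List.pyRange_zero_natCast,
          pv_alt_closed [6, 9, 5, 8, 4, 7, 3] 3 3 3 (by decide)
            (by intro t ht; interval_cases t <;> decide) n]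
      conv_lhs => rw [show (6 : Int) = PySem.Int.mod 3 7 + 3 from rfl]
      rw [pv_case 3 3 3 n, List.map_map]
      exact List.map_congr_left fun k _ => rfl
    · subst h
      simp only [show (("sharp" == "flat") = false) from rfl, Bool.false_eq_true, if_false,
        beq_self_eq_true, if_pos]
      rw [show PySem.List.pyRange 0 ((n : Int)) 1 = PySem.List.pyRange 0 ((n : Int)) from rfl,
          PySem.List.pyRange_zero_natCast,
          pv_alt_closed [10, 7, 11, 8, 12, 9, 13] 7 4 3 (by decide)
            (by intro t ht; interval_cases t <;> decide) n]
      conv_lhs => rw [show (10 : Int) = PySem.Int.mod 3 7 + 7 from rfl]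
      rw [pv_case 7 4 3 n, List.map_map]
      exact List.map_congr_left fun k _ => rfl
    · omega
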